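-- pv_equiv track=rewrite | github.com/Mark-Mulligan/advent-of-code-2023 | day12/part1.py | get_all_combinations
-- ===== SOURCE A (Python) =====
-- import itertools
--
-- def get_all_combinations(base_combination, sequence):
--     result = ["".join(item) for item in list(
--         itertools.product(['#', '.'], repeat=len(base_combination)))]
--     filtered_results = []
--     for item in result:
--         spring_counts = {}
--         spring_index = 0
--         found_group = False
--         for char in item:
--             if char == '#':
--                 found_group = True
--                 if spring_index in spring_counts:
--                     spring_counts[spring_index] += 1
--                 else:
--                     spring_counts[spring_index] = 1
--             else:
--                 if found_group:
--                     spring_index += 1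
--                 found_group = False
--
--         if len(spring_counts) == len(sequence):
--             add_combination = True
--             for i, target in enumerate(sequence):
--                 if spring_counts[i] != target:
--                     add_combination = False
--
--             if add_combination:
--                 filtered_results.append(item)
--
--     return filtered_results
-- ===== SOURCE B (Python) =====
-- def get_all_combinations(base_combination, sequence):
--     # Backtracking generator: walk positions left-to-right, '#'-branch before '.'-branch
--     # (so output is in the same order A produces), pruning states that no longer fit.
--     n = len(base_combination)
--     if any(t <= 0 for t in sequence):
--         return []
--     out = []
--
--     def rec(m, r, gs, d, prefix):
--         # m chars left; r = '#' still owed to the current group; gs = groups not yet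
--         # started; d = True when a group just closed (next char must be '.').
--         need = r + sum(gs) + len(gs)
--         if gs and r == 0 and not d:
--             need -= 1
--         if m < need:
--             return
--         if m == 0:
--             out.append(prefix)
--             return
--         if r > 0:
--             rec(m - 1, r - 1, gs, r == 1, prefix + '#')
--         elif not d and gs:
--             rec(m - 1, gs[0] - 1, gs[1:], gs[0] == 1, prefix + '#')
--         if r == 0:
--             rec(m - 1, 0, gs, False, prefix + '.')
--
--     rec(n, 0, list(sequence), False, '')
--     return out
-- ===== Notes on version B (the rewrite author's own statement) =====
-- stated objective: faster
-- what changed: A enumerates all 2^n strings of '#'/'.' and filters them by rebuilding a group-count dict for each; B never enumerates: it backtracks over positions placing required '#'s and separator '.'s ('#'-branch first, so the same lexicographic order falls out) and prunes any state whose remaining groups cannot fit, so only viable prefixes are explored.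
import Mathlib
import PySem

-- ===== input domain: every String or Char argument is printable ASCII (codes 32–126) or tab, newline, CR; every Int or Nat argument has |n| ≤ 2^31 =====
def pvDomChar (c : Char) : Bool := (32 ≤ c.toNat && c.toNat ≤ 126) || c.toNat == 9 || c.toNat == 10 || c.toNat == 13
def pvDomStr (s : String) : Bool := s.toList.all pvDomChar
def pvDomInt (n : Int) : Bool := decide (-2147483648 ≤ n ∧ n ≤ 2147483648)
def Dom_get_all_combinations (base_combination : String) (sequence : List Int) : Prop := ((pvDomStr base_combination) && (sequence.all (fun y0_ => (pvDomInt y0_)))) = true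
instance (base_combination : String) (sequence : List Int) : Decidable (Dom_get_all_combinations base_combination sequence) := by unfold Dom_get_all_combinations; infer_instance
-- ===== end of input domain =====

-- B replaces A's filter over all 2^n '#'/'.'-strings by a pruned backtracking placement of the
-- groups ('#'-branch before '.'-branch, which yields A's order); objective: faster.

-- ===== PORT A =====
-- itertools.product(['#', '.'], repeat=n): first factor varies slowest
def pvProdRep : Nat → List (List Char)
  | 0 => [[]]
  | n + 1 => ['#', '.'].flatMap (fun c => (pvProdRep n).map (fun t => c :: t))

def get_all_combinations (base_combination : String) (sequence : List Int) : List String :=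
  let result := (pvProdRep base_combination.toList.length).map (fun item => String.ofList item)
  result.foldl (fun filtered_results item =>
    let fin := item.toList.foldl (fun (st : PySem.Dict Int Int × Int × Bool) char =>
        let sc := st.1
        let si := st.2.1
        let fg := st.2.2
        if char = '#' then
          -- found_group = True; spring_counts[si] += 1 (or = 1 when absent)
          if sc.contains si then (sc.insert si (sc.getD si 0 + 1), si, true)
          else (sc.insert si 1, si, true)
        else
          (sc, (if fg then si + 1 else si), false))
      (PySem.Dict.empty, (0 : Int), false)
    let sc := fin.1
    if sc.size = sequence.length then
      -- spring_counts[i] is always present here (consecutive keys 0..size-1), so getD is exact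
      let add := (PySem.List.enumerate sequence).foldl
          (fun add p => if sc.getD p.1 0 ≠ p.2 then false else add) true
      if add then filtered_results ++ [item] else filtered_results
    else filtered_results) []

-- ===== PORT B =====
def pvNeed (r : Int) (gs : List Int) (d : Bool) : Int :=
  if gs ≠ [] ∧ r = 0 ∧ d = false then r + gs.sum + gs.length - 1
  else r + gs.sum + gs.length

def pvAltRec (m : Nat) (r : Int) (gs : List Int) (d : Bool) (pref : List Char) : List (List Char) :=
  if (m : Int) < pvNeed r gs d then []
  else
    match m with
    | 0 => [pref]
    | m' + 1 =>
      (if 0 < r then pvAltRec m' (r - 1) gs (decide (r = 1)) (pref ++ ['#'])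
       else if d = false ∧ gs ≠ [] then
         -- gs[0] / gs[1:]: guard guarantees gs ≠ [], so headI is Python-exact here
         pvAltRec m' (gs.headI - 1) gs.tail (decide (gs.headI = 1)) (pref ++ ['#'])
       else [])
      ++ (if r = 0 then pvAltRec m' 0 gs false (pref ++ ['.']) else [])
termination_by m

def get_all_combinations_alt (base_combination : String) (sequence : List Int) : List String :=
  if sequence.any (fun t => t ≤ 0) then []
  else (pvAltRec base_combination.toList.length 0 sequence false []).map (fun l => String.ofList l)

-- ===== PRECONDITION & SPEC =====
def Spec_get_all_combinations (base_combination : String) (sequence : List Int) (out : List String) : Prop := out = get_all_combinations_alt base_combination sequence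
instance (base_combination : String) (sequence : List Int) (out : List String) : Decidable (Spec_get_all_combinations base_combination sequence out) := by unfold Spec_get_all_combinations; infer_instance

-- ===== CLAIM (what is proved, stated in full; the proofs are below) =====
def Claim_equal_get_all_combinations : Prop := ∀ (base_combination : String) (sequence : List Int), Dom_get_all_combinations base_combination sequence → Spec_get_all_combinations base_combination sequence (get_all_combinations base_combination sequence)

-- ===== LEMMAS AND PROOFS =====

-- run lengths of the '#'-groups of a string, front first
def pvRuns : List Char → List Int
  | [] => []
  | c :: t =>
    if c = '#' then ((1 : Int) + (t.takeWhile (· = '#')).length) :: pvRuns (t.dropWhile (· = '#'))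
    else pvRuns t
termination_by l => l.length
decreasing_by
  · have := t.length_dropWhile_le (· = '#'); simp; omega
  · simp

-- the state predicate B's recursion generates: does l complete state (r, gs, d)?
def pvMst : List Char → Int → List Int → Bool → Bool
  | [], r, gs, _ => decide (r = 0) && gs.isEmpty
  | c :: t, r, gs, d =>
    if c = '#' then
      if 0 < r then pvMst t (r - 1) gs (decide (r = 1))
      else if d = false ∧ gs ≠ [] then
        match gs with
        | g :: rest => pvMst t (g - 1) rest (decide (g = 1))
        | [] => false
      else false
    else
      if r = 0 then pvMst t 0 gs false else false

-- forward accumulation of runs (mirrors A's dict loop); cur = count of the open run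
def pvGo : List Char → List Int → Option Int → List Int
  | [], acc, none => acc
  | [], acc, some c => acc ++ [c]
  | ch :: t, acc, cur =>
    if ch = '#' then
      match cur with
      | none => pvGo t acc (some 1)
      | some c => pvGo t acc (some (c + 1))
    else
      match cur with
      | none => pvGo t acc none
      | some c => pvGo t (acc ++ [c]) none



-- A's dict-loop state corresponding to accumulated runs `acc` and open run `cur`
def pvStOf (acc : List Int) (cur : Option Int) : PySem.Dict Int Int × Int × Bool :=
  match cur with
  | none => (PySem.Dict.mk (PySem.List.enumerate acc), (acc.length : Int), false)
  | some c => (PySem.Dict.mk (PySem.List.enumerate (acc ++ [c])), (acc.length : Int), true)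



lemma pvGo_acc (t : List Char) : ∀ (acc : List Int) (cur : Option Int),
    pvGo t acc cur = acc ++ pvGo t [] cur := by
  induction t with
  | nil => intro acc cur; cases cur <;> simp [pvGo]
  | cons ch t ih =>
    intro acc cur
    by_cases h : ch = '#'
    · cases cur <;> simp only [pvGo, h] <;> rw [ih, ih []] <;> simp
    · cases cur with
      | none => simp only [pvGo, if_neg h]; rw [ih, ih [], List.nil_append]
      | some c =>
        simp only [pvGo, if_neg h]
        rw [ih, ih ([] ++ [c])]
        simp

lemma pvGo_spec (t : List Char) :
    pvGo t [] none = pvRuns t ∧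
    ∀ c : Int, pvGo t [] (some c) =
      (c + ((t.takeWhile (· = '#')).length : Int)) :: pvRuns (t.dropWhile (· = '#')) := by
  induction t with
  | nil => constructor <;> simp [pvGo, pvRuns]
  | cons ch t ih =>
    by_cases h : ch = '#'
    · subst h
      constructor
      · simp only [pvGo, if_pos rfl]
        rw [ih.2 1, pvRuns]
        simp [List.cons.injEq]
      · intro c
        simp only [pvGo, if_pos rfl]
        rw [ih.2 (c+1)]
        simp [List.cons.injEq]
        omega
    · constructor
      · simp only [pvGo, if_neg h]
        rw [ih.1, pvRuns]
        simp [h]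
      · intro c
        simp only [pvGo, if_neg h]
        rw [pvGo_acc, ih.1]
        have h1 : (ch :: t).takeWhile (· = '#') = [] := by simp [List.takeWhile_cons, h]
        have h2 : (ch :: t).dropWhile (· = '#') = ch :: t := by simp [List.dropWhile_cons, h]
        rw [h1, h2, pvRuns]
        simp [h]

lemma pvRuns_pos : ∀ (l : List Char), ∀ x ∈ pvRuns l, 1 ≤ x := by
  intro l
  induction l using pvRuns.induct with
  | case1 => simp [pvRuns]
  | case2 t ih =>
    intro x hx; rw [pvRuns] at hx; simp at hx
    rcases hx with h1 | h2
    · subst h1; omega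
    · exact ih x h2
  | case3 c t h ih => intro x hx; rw [pvRuns] at hx; simp [h] at hx; exact ih x hx

lemma pvRuns_lead (t : List Char) (h : t.head? = some '#') :
    pvRuns t = ((t.takeWhile (· = '#')).length : Int) :: pvRuns (t.dropWhile (· = '#')) := by
  cases t with
  | nil => simp at h
  | cons c t' =>
    simp at h; subst h
    rw [pvRuns]
    simp [List.cons.injEq]
    omega

lemma pvProdRep_length : ∀ (n : Nat), ∀ l ∈ pvProdRep n, l.length = n := by
  intro n
  induction n with
  | zero => simp [pvProdRep]
  | succ n ih =>
    intro l hl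
    simp only [pvProdRep, List.mem_flatMap, List.mem_map] at hl
    obtain ⟨c, _, t, ht, rfl⟩ := hl
    simp [ih t ht]

lemma pvCheckFold (sc : PySem.Dict Int Int) : ∀ (seq : List Int) (s : Int) (b : Bool),
    (PySem.List.enumerate seq s).foldl (fun add p => if sc.getD p.1 0 ≠ p.2 then false else add) b
    = (b && decide (∀ p ∈ PySem.List.enumerate seq s, sc.getD p.1 0 = p.2)) := by
  intro seq
  induction seq with
  | nil => intro s b; simp [PySem.List.enumerate_nil]
  | cons x xs ih =>
    intro s b
    rw [PySem.List.enumerate_cons]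
    simp only [List.foldl_cons]
    rw [ih]
    by_cases h : sc.getD s 0 = x
    · simp only [List.forall_mem_cons, h]
      simp
    · simp [List.forall_mem_cons, h]

lemma pvEnumKeys (l : List Int) :
    (PySem.Dict.mk (PySem.List.enumerate l)).keys = PySem.List.pyRange 0 l.length 1 := by
  have := PySem.List.map_fst_enumerate l (0 : Int)
  simp only [PySem.Dict.keys] at *
  simpa using this

lemma pvEnumContains (l : List Int) (j : Int) :
    (PySem.Dict.mk (PySem.List.enumerate l)).contains j = decide (0 ≤ j ∧ j < l.length) := by
  rw [PySem.Dict.contains_eq_decide_mem_keys, pvEnumKeys]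
  simp [PySem.List.mem_pyRange_one]

lemma pvEnumDict_getD (l : List Int) (i : Nat) (h : i < l.length) :
    (PySem.Dict.mk (PySem.List.enumerate l)).getD (i : Int) 0 = l[i] := by
  have hnd : (PySem.Dict.mk (PySem.List.enumerate l)).keys.Nodup := by
    rw [pvEnumKeys]; exact PySem.List.nodup_pyRange_one 0 l.length
  have hmem : ((i : Int), l[i]) ∈ (PySem.Dict.mk (PySem.List.enumerate l)).items := by
    show ((i : Int), l[i]) ∈ PySem.List.enumerate l
    rw [PySem.List.mem_enumerate_iff]
    exact ⟨i, h, by simp⟩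
  exact PySem.Dict.getD_of_mem_items _ hmem hnd 0

-- inserting the fresh key l.length appends

lemma pvInsertFresh (l : List Int) (v : Int) :
    (PySem.Dict.mk (PySem.List.enumerate l)).insert (l.length : Int) v
      = PySem.Dict.mk (PySem.List.enumerate (l ++ [v])) := by
  apply PySem.Dict.ext
  rw [PySem.Dict.items_insert_of_not_contains]
  · show PySem.List.enumerate l ++ [((l.length : Int), v)] = PySem.List.enumerate (l ++ [v])
    rw [PySem.List.enumerate_append]
    simp [PySem.List.enumerate_cons, PySem.List.enumerate_nil]
  · rw [pvEnumContains]; simp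

-- overwriting the last key bumps the last value

lemma pvInsertLast (l : List Int) (c v : Int) :
    (PySem.Dict.mk (PySem.List.enumerate (l ++ [c]))).insert (l.length : Int) v
      = PySem.Dict.mk (PySem.List.enumerate (l ++ [v])) := by
  apply PySem.Dict.ext
  rw [PySem.Dict.items_insert_of_contains]
  · show (PySem.List.enumerate (l ++ [c])).map _ = PySem.List.enumerate (l ++ [v])
    rw [PySem.List.enumerate_append, PySem.List.enumerate_append, List.map_append]
    congr 1
    · have : ∀ p ∈ PySem.List.enumerate l (0 : Int),
          (fun p : Int × Int => if p.1 == (l.length : Int) then ((l.length : Int), v) else p) p = id p := by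
        intro p hp
        rw [PySem.List.mem_enumerate_iff] at hp
        obtain ⟨k, hk, rfl⟩ := hp
        simp
        omega
      rw [List.map_congr_left this, List.map_id]
    · simp [PySem.List.enumerate_cons, PySem.List.enumerate_nil]
  · rw [pvEnumContains]; simp

lemma pvGetDLast (l : List Int) (c : Int) :
    (PySem.Dict.mk (PySem.List.enumerate (l ++ [c]))).getD (l.length : Int) 0 = c := by
  have h : l.length < (l ++ [c]).length := by simp
  have := pvEnumDict_getD (l ++ [c]) l.length h
  simpa using this

def pvStepA (st : PySem.Dict Int Int × Int × Bool) (char : Char) : PySem.Dict Int Int × Int × Bool :=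
  let sc := st.1
  let si := st.2.1
  let fg := st.2.2
  if char = '#' then
    if sc.contains si then (sc.insert si (sc.getD si 0 + 1), si, true)
    else (sc.insert si 1, si, true)
  else
    (sc, (if fg then si + 1 else si), false)

lemma pvStepA_hash_none (acc : List Int) :
    pvStepA (pvStOf acc none) '#' = pvStOf acc (some 1) := by
  have hc : (PySem.Dict.mk (PySem.List.enumerate acc)).contains (acc.length : Int) = false := by
    rw [pvEnumContains]; simp
  simp only [pvStepA, pvStOf, if_pos rfl, hc]
  simp only [Bool.false_eq_true, if_false]
  rw [pvInsertFresh]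
  simp

lemma pvStepA_hash_some (acc : List Int) (c : Int) :
    pvStepA (pvStOf acc (some c)) '#' = pvStOf acc (some (c + 1)) := by
  have hc : (PySem.Dict.mk (PySem.List.enumerate (acc ++ [c]))).contains (acc.length : Int) = true := by
    rw [pvEnumContains]; simp
  simp only [pvStepA, pvStOf, if_pos rfl, hc, if_true]
  rw [pvGetDLast, pvInsertLast]

lemma pvStepA_dot_none (acc : List Int) (ch : Char) (h : ¬ ch = '#') :
    pvStepA (pvStOf acc none) ch = pvStOf acc none := by
  simp [pvStepA, pvStOf, h]

lemma pvStepA_dot_some (acc : List Int) (c : Int) (ch : Char) (h : ¬ ch = '#') :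
    pvStepA (pvStOf acc (some c)) ch = pvStOf (acc ++ [c]) none := by
  simp [pvStepA, pvStOf, h]

lemma pvLoopA (t : List Char) : ∀ (acc : List Int) (cur : Option Int),
    (t.foldl pvStepA (pvStOf acc cur)).1
      = PySem.Dict.mk (PySem.List.enumerate (pvGo t acc cur)) := by
  induction t with
  | nil => intro acc cur; cases cur <;> simp [pvGo, pvStOf]
  | cons ch t ih =>
    intro acc cur
    rw [List.foldl_cons]
    by_cases h : ch = '#'
    · subst h
      cases cur with
      | none =>
        rw [pvStepA_hash_none, ih]
        simp [pvGo]
      | some c =>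
        rw [pvStepA_hash_some, ih]
        simp [pvGo]
    · cases cur with
      | none =>
        rw [pvStepA_dot_none acc ch h, ih]
        simp [pvGo, h]
      | some c =>
        rw [pvStepA_dot_some acc c ch h, ih]
        simp [pvGo, h]


-- the final membership loop of A

-- A = filter (runs = sequence) over the full product
lemma pvRuns_size (cs : List Char) :
    (PySem.Dict.mk (PySem.List.enumerate (pvRuns cs))).size = (pvRuns cs).length := by
  show (PySem.List.enumerate (pvRuns cs)).length = _
  exact PySem.List.length_enumerate _ _

lemma pvBody (seq : List Int) (fr : List String) (cs : List Char) :
    (fun filtered_results (item : String) =>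
      let fin := item.toList.foldl pvStepA (PySem.Dict.empty, (0 : Int), false)
      let sc := fin.1
      if sc.size = seq.length then
        let add := (PySem.List.enumerate seq).foldl
            (fun add p => if sc.getD p.1 0 ≠ p.2 then false else add) true
        if add then filtered_results ++ [item] else filtered_results
      else filtered_results) fr (String.ofList cs)
    = if decide (pvRuns cs = seq) then fr ++ [String.ofList cs] else fr := by
  have hfold : ∀ l : List Char, l.foldl pvStepA (PySem.Dict.empty, (0 : Int), false)
      = l.foldl pvStepA (pvStOf [] none) := fun _ => rfl
  simp only [String.toList_ofList, hfold]
  have h1 : ((cs.foldl pvStepA (pvStOf [] none)).1)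
      = PySem.Dict.mk (PySem.List.enumerate (pvRuns cs)) := by
    rw [pvLoopA, (pvGo_spec cs).1]
  simp only [h1, pvRuns_size, pvCheckFold, Bool.true_and]
  by_cases hlen : (pvRuns cs).length = seq.length
  · simp only [hlen, if_pos rfl]
    have hiff : (∀ p ∈ PySem.List.enumerate seq 0,
        (PySem.Dict.mk (PySem.List.enumerate (pvRuns cs))).getD p.1 0 = p.2) ↔ pvRuns cs = seq := by
      constructor
      · intro hp
        apply List.ext_getElem hlen
        intro i h1i h2i
        have hm : ((0 + i : Int), seq[i]) ∈ PySem.List.enumerate seq 0 := by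
          rw [PySem.List.mem_enumerate_iff]; exact ⟨i, h2i, rfl⟩
        have := hp _ hm
        simp only [zero_add] at this
        rw [pvEnumDict_getD (pvRuns cs) i h1i] at this
        exact this
      · intro hq
        subst hq
        intro p hp
        rw [PySem.List.mem_enumerate_iff] at hp
        obtain ⟨k, hk, rfl⟩ := hp
        simp only [zero_add]
        exact pvEnumDict_getD _ k hk
    simp only [hiff]
    simp
  · have hne : ¬ (pvRuns cs = seq) := fun hh => hlen (by rw [hh])
    simp [hlen, hne]

lemma pvA_eq_filter (b : String) (seq : List Int) :
    get_all_combinations b seq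
    = ((pvProdRep b.toList.length).filter (fun l => decide (pvRuns l = seq))).map
        (fun l => String.ofList l) := by
  show (List.map (fun item => String.ofList item) (pvProdRep b.toList.length)).foldl
      (fun filtered_results item =>
        let fin := item.toList.foldl pvStepA (PySem.Dict.empty, (0 : Int), false)
        let sc := fin.1
        if sc.size = seq.length then
          let add := (PySem.List.enumerate seq).foldl
              (fun add p => if sc.getD p.1 0 ≠ p.2 then false else add) true
          if add then filtered_results ++ [item] else filtered_results
        else filtered_results) [] = _
  have hcong : ∀ (fr : List String), ∀ item ∈ (pvProdRep b.toList.length).map (fun l => String.ofList l),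
      (fun filtered_results (item : String) =>
        let fin := item.toList.foldl pvStepA (PySem.Dict.empty, (0 : Int), false)
        let sc := fin.1
        if sc.size = seq.length then
          let add := (PySem.List.enumerate seq).foldl
              (fun add p => if sc.getD p.1 0 ≠ p.2 then false else add) true
          if add then filtered_results ++ [item] else filtered_results
        else filtered_results) fr item
      = (fun fr (item : String) =>
          if (fun s : String => decide (pvRuns s.toList = seq)) item = true
          then fr ++ [id item] else fr) fr item := by
    intro fr item hitem
    rw [List.mem_map] at hitem
    obtain ⟨cs, hcs, rfl⟩ := hitem
    rw [pvBody]
    simp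
  rw [PySem.List.foldl_congr_mem _ _ _ _ hcong,
    PySem.List.foldl_append_if (fun s : String => decide (pvRuns s.toList = seq)) id,
    List.filter_map]
  simp only [List.map_id, List.nil_append]
  congr 1
  apply List.filter_congr
  intro cs hcs
  simp

lemma pvAltRec_pref : ∀ (m : Nat) (r : Int) (gs : List Int) (d : Bool) (pref : List Char),
    pvAltRec m r gs d pref = (pvAltRec m r gs d []).map (pref ++ ·) := by
  intro m
  induction m with
  | zero =>
    intro r gs d pref
    rw [pvAltRec.eq_def, pvAltRec.eq_def]
    split <;> simp
  | succ m ih =>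
    intro r gs d pref
    rw [pvAltRec.eq_def]
    conv_rhs => rw [pvAltRec.eq_def]
    by_cases h0 : ((m : Int) + 1) < pvNeed r gs d
    · simp only [Nat.cast_succ, if_pos h0]
      simp
    · simp only [Nat.cast_succ, if_neg h0, List.map_append]
      congr 1
      · by_cases hr : 0 < r
        · simp only [if_pos hr]
          rw [ih, ih (r-1) gs (decide (r=1)) (([]) ++ ['#'])]
          simp [List.map_map, Function.comp_def]
        · simp only [if_neg hr]
          by_cases hd : d = false ∧ gs ≠ []
          · simp only [if_pos hd]
            rw [ih, ih (gs.headI - 1) gs.tail (decide (gs.headI = 1)) (([]) ++ ['#'])]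
            simp [List.map_map, Function.comp_def]
          · simp only [if_neg hd]
            simp
      · by_cases hr : r = 0
        · simp only [if_pos hr]
          rw [ih, ih 0 gs false (([]) ++ ['.'])]
          simp [List.map_map, Function.comp_def]
        · simp only [if_neg hr]
          simp

lemma pvMst_need_le : ∀ (l : List Char) (r : Int) (gs : List Int) (d : Bool),
    pvMst l r gs d = true → pvNeed r gs d ≤ l.length := by
  intro l
  induction l with
  | nil =>
    intro r gs d h
    simp [pvMst] at h
    obtain ⟨h1, h2⟩ := h
    subst h1 h2
    simp [pvNeed]
  | cons c t ih =>
    intro r gs d h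
    rw [pvMst.eq_def] at h
    by_cases hc : c = '#'
    · simp only [hc, if_pos rfl] at h
      by_cases hr : 0 < r
      · rw [if_pos hr] at h
        have := ih _ _ _ h
        simp only [pvNeed] at this ⊢
        split at this <;> split <;> simp_all <;> omega
      · rw [if_neg hr] at h
        by_cases hd : d = false ∧ gs ≠ []
        · rw [if_pos hd] at h
          match gs, hd with
          | g :: rest, hd =>
            have := ih _ _ _ h
            simp only [pvNeed] at this ⊢
            split at this <;> split <;> simp_all <;> omega
        · rw [if_neg hd] at h
          exact absurd h (by simp)
    · simp only [hc, if_neg hc] at h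
      by_cases hr : r = 0
      · rw [if_pos hr] at h
        subst hr
        have := ih _ _ _ h
        simp only [pvNeed] at this ⊢
        split at this <;> split <;> simp_all <;> omega
      · rw [if_neg hr] at h
        exact absurd h (by simp)

lemma pvTw0 (t : List Char) : t.head? ≠ some '#' ↔ t.takeWhile (· = '#') = [] := by
  cases t with
  | nil => simp
  | cons c t' =>
    by_cases h : c = '#' <;> simp [h, List.takeWhile_cons]

lemma pvDw0 (t : List Char) (h : t.head? ≠ some '#') : t.dropWhile (· = '#') = t := by
  cases t with
  | nil => simp
  | cons c t' =>
    have : ¬ c = '#' := by intro hh; exact h (by simp [hh])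
    simp [List.dropWhile_cons, this]

lemma pvTwPos (t : List Char) (h : ¬ t.takeWhile (· = '#') = []) : t.head? = some '#' := by
  by_contra hh
  exact h ((pvTw0 t).mp hh)

lemma pvRuns_cons_hash (t : List Char) :
    pvRuns ('#' :: t) = ((1 : Int) + (t.takeWhile (· = '#')).length) :: pvRuns (t.dropWhile (· = '#')) := by
  rw [pvRuns]
  simp

lemma pvTwLen_cons (t : List Char) :
    ((('#' :: t).takeWhile (· = '#')).length : Int) = 1 + (t.takeWhile (· = '#')).length := by
  simp [List.takeWhile_cons]
  omega

-- consuming one required '#' with exactly one more needed (k = 1 case)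

lemma pvStep_one (t : List Char) (gs : List Int) :
    (t.head? ≠ some '#' ∧ pvRuns t = gs) ↔
      ((('#' :: t).takeWhile (· = '#')).length : Int) = 1 ∧ pvRuns ('#' :: t) = 1 :: gs := by
  rw [pvRuns_cons_hash, pvTwLen_cons]
  constructor
  · rintro ⟨hh, hrt⟩
    have htw : t.takeWhile (· = '#') = [] := (pvTw0 t).mp hh
    rw [pvDw0 t hh, htw]
    simp [hrt]
  · rintro ⟨hlen, hrest⟩
    have htw : t.takeWhile (· = '#') = [] := by
      refine List.eq_nil_of_length_eq_zero ?_
      omega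
    have hh : t.head? ≠ some '#' := (pvTw0 t).mpr htw
    rw [pvDw0 t hh, htw] at hrest
    simp at hrest
    exact ⟨hh, hrest⟩

-- consuming one required '#' with k ≥ 2 more needed

lemma pvStep_many (t : List Char) (gs : List Int) (k : Int) (hk : 1 < k) :
    (((t.takeWhile (· = '#')).length : Int) = k - 1 ∧ pvRuns t = (k - 1) :: gs) ↔
      ((('#' :: t).takeWhile (· = '#')).length : Int) = k ∧ pvRuns ('#' :: t) = k :: gs := by
  rw [pvRuns_cons_hash, pvTwLen_cons]
  constructor
  · rintro ⟨htw, hrt⟩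
    have hne : ¬ t.takeWhile (· = '#') = [] := by
      intro hh; rw [hh] at htw; simp at htw; omega
    rw [pvRuns_lead t (pvTwPos t hne), htw] at hrt
    obtain ⟨-, h2⟩ := List.cons_eq_cons.mp hrt
    constructor
    · omega
    · rw [h2]; congr 1; omega
  · rintro ⟨hlen, hrest⟩
    have htw : ((t.takeWhile (· = '#')).length : Int) = k - 1 := by omega
    have hne : ¬ t.takeWhile (· = '#') = [] := by
      intro hh; rw [hh] at htw; simp at htw; omega
    obtain ⟨-, h2⟩ := List.cons_eq_cons.mp hrest
    refine ⟨htw, ?_⟩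
    rw [pvRuns_lead t (pvTwPos t hne), htw, h2]

lemma pvMst_iff : ∀ (l : List Char) (r : Int) (gs : List Int) (d : Bool),
    (∀ g ∈ gs, 1 ≤ g) → 0 ≤ r → (d = true → r = 0) →
    (pvMst l r gs d = true ↔
      (if 0 < r then ((l.takeWhile (· = '#')).length : Int) = r ∧ pvRuns l = r :: gs
       else if d then l.head? ≠ some '#' ∧ pvRuns l = gs
       else pvRuns l = gs)) := by
  intro l
  induction l with
  | nil =>
    intro r gs d hgs hr hd
    simp only [pvMst, pvRuns, Bool.and_eq_true, decide_eq_true_eq, List.isEmpty_iff,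
      List.takeWhile_nil, List.length_nil, List.head?_nil, Nat.cast_zero]
    split_ifs with h1 h2 <;> constructor <;> intro hx
    · exact absurd hx.1 (by omega)
    · omega
    · simp [hx.2]
    · exact ⟨by omega, hx.2.symm⟩
    · exact hx.2.symm
    · exact ⟨by omega, hx.symm⟩
  | cons c t ih =>
    intro r gs d hgs hr hd
    by_cases hc : c = '#'
    · subst hc
      simp only [pvMst, if_pos rfl]
      by_cases hr0 : 0 < r
      · simp only [hr0, if_true]
        have IH := ih (r - 1) gs (decide (r = 1)) hgs (by omega)
          (by intro h; simp at h; omega)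
        rw [IH]
        by_cases hr1 : r = 1
        · subst hr1
          rw [if_neg (by omega : ¬ (0:Int) < 1 - 1), if_pos (by simp : decide ((1:Int) = 1) = true)]
          exact pvStep_one t gs
        · rw [if_pos (by omega : (0:Int) < r - 1)]
          exact pvStep_many t gs r (by omega)
      · have hreq : r = 0 := by omega
        subst hreq
        rw [if_neg hr0, if_neg hr0]
        by_cases hdt : d = true
        · rw [if_neg (by simp [hdt] : ¬ (d = false ∧ gs ≠ [])), if_pos hdt]
          simp
        · have hdf : d = false := by simp at hdt; exact hdt
          subst hdf
          rw [if_neg (by simp : ¬ (false : Bool) = true)]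
          cases gs with
          | nil =>
            rw [if_neg (by simp : ¬ ((false : Bool) = false ∧ ([] : List Int) ≠ []))]
            rw [pvRuns_cons_hash]
            simp
          | cons g rest =>
            have hcnd : (True ∧ (g :: rest : List Int) ≠ []) = True := by simp
            have hcnd2 : (((false : Bool) = false) ∧ (g :: rest : List Int) ≠ []) = True := by simp
            simp only [hcnd, hcnd2, if_true]
            have hg : 1 ≤ g := hgs g (by simp)
            have IH := ih (g - 1) rest (decide (g = 1)) (fun x hx => hgs x (by simp [hx]))
              (by omega) (by intro h; simp at h; omega)
            rw [IH]
            by_cases hg1 : g = 1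
            · subst hg1
              rw [if_neg (by omega : ¬ (0:Int) < 1 - 1), if_pos (by simp : decide ((1:Int) = 1) = true)]
              refine (pvStep_one t rest).trans ⟨And.right, fun h => ⟨?_, h⟩⟩
              rw [pvRuns_cons_hash] at h
              obtain ⟨h1, -⟩ := List.cons_eq_cons.mp h
              rw [pvTwLen_cons]
              omega
            · rw [if_pos (by omega : (0:Int) < g - 1)]
              refine (pvStep_many t rest g (by omega)).trans ⟨And.right, fun h => ⟨?_, h⟩⟩
              rw [pvRuns_cons_hash] at h
              obtain ⟨h1, -⟩ := List.cons_eq_cons.mp h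
              rw [pvTwLen_cons]
              omega
    · have hrl : pvRuns (c :: t) = pvRuns t := by rw [pvRuns, if_neg hc]
      have htw : (c :: t).takeWhile (· = '#') = [] := by simp [List.takeWhile_cons, hc]
      simp only [pvMst, if_neg hc]
      by_cases hr0 : r = 0
      · subst hr0
        rw [if_pos rfl, if_neg (by omega : ¬ (0:Int) < 0)]
        have IH := ih 0 gs false hgs le_rfl (by simp)
        rw [if_neg (by omega : ¬ (0:Int) < 0)] at IH
        rw [if_neg (by simp : ¬ (false : Bool) = true)] at IH
        rw [IH, hrl]
        by_cases hdt : d = true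
        · rw [if_pos hdt]
          have hh : (c :: t).head? ≠ some '#' := by simp [hc]
          constructor
          · intro h; exact ⟨hh, h⟩
          · intro h; exact h.2
        · rw [if_neg hdt]
      · rw [if_neg hr0, if_pos (by omega : 0 < r)]
        constructor
        · intro h; simp at h
        · rintro ⟨h1, -⟩
          rw [htw] at h1
          simp at h1
          omega

lemma pvSumLB : ∀ (gs : List Int), (∀ g ∈ gs, 1 ≤ g) → (gs.length : Int) ≤ gs.sum := by
  intro gs
  induction gs with
  | nil => simp
  | cons g rest ih =>
    intro h
    have h1 := h g (by simp)
    have h2 := ih (fun x hx => h x (by simp [hx]))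
    simp only [List.length_cons, List.sum_cons]
    push_cast
    omega

lemma pvProdRep_succ (n : Nat) :
    pvProdRep (n + 1) = (pvProdRep n).map ('#' :: ·) ++ (pvProdRep n).map ('.' :: ·) := by
  simp [pvProdRep]

lemma pvNeed_pos (gs : List Int) (r : Int) (d : Bool) (hgs : ∀ g ∈ gs, 1 ≤ g)
    (hr : 0 ≤ r) (hne : gs ≠ []) : 1 ≤ pvNeed r gs d := by
  have hs := pvSumLB gs hgs
  have hlen : 1 ≤ gs.length := by
    cases gs with
    | nil => exact absurd rfl hne
    | cons a b => simp
  unfold pvNeed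
  split_ifs <;> push_cast <;> omega

lemma pvAltRec_succ (m : Nat) (r : Int) (gs : List Int) (d : Bool) (pref : List Char) :
    pvAltRec (m + 1) r gs d pref =
      if ((m : Int) + 1) < pvNeed r gs d then []
      else
        ((if 0 < r then pvAltRec m (r - 1) gs (decide (r = 1)) (pref ++ ['#'])
          else if d = false ∧ gs ≠ [] then
            pvAltRec m (gs.headI - 1) gs.tail (decide (gs.headI = 1)) (pref ++ ['#'])
          else [])
         ++ (if r = 0 then pvAltRec m 0 gs false (pref ++ ['.']) else [])) := by
  rw [pvAltRec.eq_def]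
  norm_num

lemma pvAltRec_eq_filter : ∀ (m : Nat) (r : Int) (gs : List Int) (d : Bool),
    (∀ g ∈ gs, 1 ≤ g) → 0 ≤ r → (d = true → r = 0) →
    pvAltRec m r gs d [] = (pvProdRep m).filter (fun l => pvMst l r gs d) := by
  intro m
  induction m with
  | zero =>
    intro r gs d hgs hr hd
    rw [pvAltRec.eq_def]
    simp only [pvProdRep, Nat.cast_zero]
    by_cases h : (0 : Int) < pvNeed r gs d
    · rw [if_pos h]
      have hf : pvMst [] r gs d = false := by
        simp only [pvMst, Bool.and_eq_true, decide_eq_true_eq, List.isEmpty_iff]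
        by_cases hgse : gs = []
        · subst hgse
          have hn : pvNeed r [] d = r := by unfold pvNeed; simp
          rw [hn] at h
          simp
          intro hrr
          omega
        · simp [hgse]
      simp [hf]
    · rw [if_neg h]
      have ht : pvMst [] r gs d = true := by
        simp only [pvMst, Bool.and_eq_true, decide_eq_true_eq, List.isEmpty_iff]
        by_cases hgse : gs = []
        · subst hgse
          have hn : pvNeed r [] d = r := by unfold pvNeed; simp
          rw [hn] at h
          exact ⟨by omega, rfl⟩
        · exact absurd (pvNeed_pos gs r d hgs hr hgse) (by omega)
      simp [ht]
  | succ m ih =>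
    intro r gs d hgs hr hd
    rw [pvAltRec_succ]
    by_cases hprune : ((m : Int) + 1) < pvNeed r gs d
    · rw [if_pos hprune]
      symm
      rw [List.filter_eq_nil_iff]
      intro l hl
      simp only [Bool.not_eq_true]
      by_contra hb
      have hml : pvMst l r gs d = true := by
        cases hx : pvMst l r gs d
        · exact absurd hx hb
        · rfl
      have hle := pvMst_need_le l r gs d hml
      rw [pvProdRep_length (m + 1) l hl] at hle
      push_cast at hle
      omega
    · rw [if_neg hprune]
      rw [pvProdRep_succ, List.filter_append, List.filter_map, List.filter_map]
      congr 1
      · -- '#' branch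
        by_cases hr0 : 0 < r
        · simp only [hr0, if_true]
          have hpt : ∀ l' ∈ pvProdRep m, ((fun l => pvMst l r gs d) ∘ ('#' :: ·)) l'
              = (fun l' => pvMst l' (r - 1) gs (decide (r = 1))) l' := by
            intro l' _
            simp [pvMst, hr0]
          rw [List.filter_congr hpt, pvAltRec_pref,
            ih (r - 1) gs (decide (r = 1)) hgs (by omega) (by intro hq; simp at hq; omega)]
          simp
        · have hr00 : r = 0 := by omega
          subst hr00
          by_cases hd0 : d = false ∧ gs ≠ []
          · obtain ⟨hdf, hne⟩ := hd0
            subst hdf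
            have hcnd : (((false : Bool) = false) ∧ gs ≠ []) = True := by simp [hne]
            simp only [hr0, if_false, hcnd, if_true]
            obtain ⟨g, rest, rfl⟩ : ∃ g rest, gs = g :: rest := by
              cases gs with
              | nil => exact absurd rfl hne
              | cons a b => exact ⟨a, b, rfl⟩
            have hg : 1 ≤ g := hgs g (by simp)
            have hgs' : ∀ x ∈ rest, 1 ≤ x := fun x hx => hgs x (by simp [hx])
            have hpt : ∀ l' ∈ pvProdRep m, ((fun l => pvMst l 0 (g :: rest) false) ∘ ('#' :: ·)) l'
                = (fun l' => pvMst l' ((g :: rest).headI - 1) (g :: rest).tail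
                    (decide ((g :: rest).headI = 1))) l' := by
              intro l' _
              simp [pvMst]
              try rfl
            rw [List.filter_congr hpt, pvAltRec_pref,
              ih ((g :: rest).headI - 1) (g :: rest).tail (decide ((g :: rest).headI = 1))
                (by simpa using hgs') (by show (0:Int) ≤ g - 1; omega) (by intro hq; simp only [decide_eq_true_eq] at hq; omega)]
            simp
          · have hcnd : (d = false ∧ gs ≠ []) = False := by simp only [eq_false hd0]
            simp only [hr0, if_false, hcnd]
            symm
            simp only [List.map_eq_nil_iff, List.filter_eq_nil_iff]
            intro l' _
            simp [pvMst, hd0]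
      · -- '.' branch
        by_cases hrz : r = 0
        · subst hrz
          have hcz : ((0 : Int) = 0) = True := by simp
          simp only [hcz, if_true]
          have hpt : ∀ l' ∈ pvProdRep m, ((fun l => pvMst l 0 gs d) ∘ ('.' :: ·)) l'
              = (fun l' => pvMst l' 0 gs false) l' := by
            intro l' _
            simp [pvMst]
          rw [List.filter_congr hpt, pvAltRec_pref, ih 0 gs false hgs le_rfl (by simp)]
          simp
        · have hcz : (r = 0) = False := by simp [hrz]
          simp only [hcz, if_false]
          symm
          simp only [List.map_eq_nil_iff, List.filter_eq_nil_iff]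
          intro l' _
          simp [pvMst, hrz]

-- ===== VERDICT (by name: the statement is the Claim_ definition above) =====
theorem get_all_combinations_spec : Claim_equal_get_all_combinations := by
  intro b seq _
  unfold Spec_get_all_combinations
  rw [pvA_eq_filter]
  unfold get_all_combinations_alt
  by_cases hneg : seq.any (fun t => t ≤ 0)
  · rw [if_pos hneg]
    have hnil : ∀ l ∈ pvProdRep b.toList.length, ¬ ((fun l => decide (pvRuns l = seq)) l = true) := by
      intro l _ hdd
      simp only [decide_eq_true_eq] at hdd
      simp only [List.any_eq_true, decide_eq_true_eq] at hneg
      obtain ⟨g, hg, hgle⟩ := hneg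
      have := pvRuns_pos l g (by rw [hdd]; exact hg)
      omega
    rw [List.filter_eq_nil_iff.mpr hnil]
    simp
  · rw [if_neg hneg]
    have hpos : ∀ g ∈ seq, 1 ≤ g := by
      intro g hgm
      simp only [List.any_eq_true, decide_eq_true_eq, not_exists, not_and] at hneg
      have := hneg g hgm
      omega
    rw [pvAltRec_eq_filter b.toList.length 0 seq false hpos le_rfl (by simp)]
    congr 1
    apply List.filter_congr
    intro l _
    have hiff := pvMst_iff l 0 seq false hpos le_rfl (by simp)
    rw [if_neg (by omega : ¬ (0:Int) < 0), if_neg (by simp : ¬ (false : Bool) = true)] at hiff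
    by_cases hrl : pvRuns l = seq
    · simp [hrl, hiff.mpr hrl]
    · cases hx : pvMst l 0 seq false
      · simp [hrl]
      · exact absurd (hiff.mp hx) hrl
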